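-- pv_equiv track=rewrite | github.com/Hematies/PredicMem25 | extra/trace.py | __insert_element_in_line
-- ===== SOURCE A (Python) =====
-- def __insert_element_in_line(line, new_element, index, separator=","):
--     elements = line.split(separator)
--     if index == -1:
--         index = len(elements)
--     left_elements = elements[:index]
--     right_elements = elements[index:]
--     output_line = ""
--     for element in left_elements:
--         output_line = output_line + element + separator
--     output_line = output_line + new_element
--     for element in right_elements:
--         output_line = output_line + separator + element
--     return output_line
-- ===== SOURCE B (Python) =====
-- def __insert_element_in_line(line, new_element, index, separator=","):
--     elements = line.split(separator)
--     if index == -1: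
--         index = len(elements)
--     elements.insert(index, new_element)
--     return separator.join(elements)
-- ===== Notes on version B (the rewrite author's own statement) =====
-- stated objective: idiomatic
-- what changed: Replaces the two-slice decomposition and the two manual concatenation loops with a single list.insert at the (guarded) index followed by separator.join.
import Mathlib
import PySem

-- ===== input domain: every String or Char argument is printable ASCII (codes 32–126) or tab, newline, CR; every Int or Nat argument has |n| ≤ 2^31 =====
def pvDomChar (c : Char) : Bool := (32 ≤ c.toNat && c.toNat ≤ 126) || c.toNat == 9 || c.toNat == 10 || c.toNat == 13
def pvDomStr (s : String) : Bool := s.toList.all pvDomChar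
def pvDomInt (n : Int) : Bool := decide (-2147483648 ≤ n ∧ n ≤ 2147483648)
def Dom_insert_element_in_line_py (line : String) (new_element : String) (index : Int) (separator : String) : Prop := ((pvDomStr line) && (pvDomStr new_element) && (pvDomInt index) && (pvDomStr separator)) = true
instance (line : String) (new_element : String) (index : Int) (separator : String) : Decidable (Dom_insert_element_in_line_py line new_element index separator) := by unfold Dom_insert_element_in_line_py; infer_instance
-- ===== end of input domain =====

-- B replaces the two-slice decomposition and both concatenation loops with a single
-- list insert followed by separator.join (simpler; return value only, no observable mutation).

-- ===== PORT A =====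
def insert_element_in_line_py (line : String) (new_element : String) (index : Int) (separator : String) : String :=
  match PySem.Str.split? line separator with
  | none => ""   -- separator = "": Python raises ValueError; excluded by Pre_
  | some elements =>
    let index := if index = -1 then (elements.length : Int) else index
    let left_elements := PySem.List.slice elements none (some index)
    let right_elements := PySem.List.slice elements (some index) none
    let output_line :=
      left_elements.foldl (fun output_line element => output_line ++ element ++ separator) ""
    let output_line := output_line ++ new_element
    right_elements.foldl (fun output_line element => output_line ++ separator ++ element) output_line

-- ===== PORT B =====
def insert_element_in_line_py_alt (line : String) (new_element : String) (index : Int) (separator : String) : String :=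
  match PySem.Str.split? line separator with
  | none => ""   -- separator = "": Python raises ValueError; excluded by Pre_
  | some elements =>
    let index := if index = -1 then (elements.length : Int) else index
    PySem.Str.join separator (PySem.List.insert elements index new_element)

-- ===== PRECONDITION & SPEC =====
-- Pre_ excludes only separator = "", on which Python's str.split raises ValueError.
def Pre_insert_element_in_line_py (line : String) (new_element : String) (index : Int) (separator : String) : Prop :=
  separator ≠ ""
instance (line : String) (new_element : String) (index : Int) (separator : String) : Decidable (Pre_insert_element_in_line_py line new_element index separator) := by unfold Pre_insert_element_in_line_py; infer_instance

def pvWitness_insert_element_in_line_py : String × String × Int × String := ("a,b", "x", 1, ",")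

def Spec_insert_element_in_line_py (line : String) (new_element : String) (index : Int) (separator : String) (out : String) : Prop := out = insert_element_in_line_py_alt line new_element index separator
instance (line : String) (new_element : String) (index : Int) (separator : String) (out : String) : Decidable (Spec_insert_element_in_line_py line new_element index separator out) := by unfold Spec_insert_element_in_line_py; infer_instance

-- ===== CLAIM (what is proved, stated in full; the proofs are below) =====
def Claim_equal_insert_element_in_line_py : Prop := ∀ (line : String) (new_element : String) (index : Int) (separator : String), Dom_insert_element_in_line_py line new_element index separator → Pre_insert_element_in_line_py line new_element index separator → Spec_insert_element_in_line_py line new_element index separator (insert_element_in_line_py line new_element index separator)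

-- ===== LEMMAS AND PROOFS =====

-- Python list.insert(i, v) is take/drop at the clamped index.
theorem pv_insert_eq_take_drop {α : Type} (xs : List α) (i : Int) (v : α) :
    PySem.List.insert xs i v =
      xs.take (PySem.List.clampIdx xs.length i) ++ v :: xs.drop (PySem.List.clampIdx xs.length i) := by
  have hk : ((if i < 0 then max (i + (xs.length : Int)) 0 else min i (xs.length : Int)).toNat)
      = PySem.List.clampIdx xs.length i := by
    simp only [PySem.List.clampIdx]
    split_ifs <;> omega
  simp only [PySem.List.insert, PySem.List.sliceIndices]
  norm_num
  rw [hk]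

theorem pv_slice_none_some {α : Type} (xs : List α) (i : Int) :
    PySem.List.slice xs none (some i) = xs.take (PySem.List.clampIdx xs.length i) := by
  simp [PySem.List.slice]

-- sep.join (x :: y :: l) peels off x ++ sep.
theorem pv_join_cons_cons (sep a b : String) (l : List String) :
    PySem.Str.join sep (a :: b :: l) = a ++ sep ++ PySem.Str.join sep (b :: l) := by
  apply String.toList_inj.mp
  simp [PySem.Str.toList_join, PySem.Chars.join_cons_cons]

theorem pv_join_singleton (sep a : String) : PySem.Str.join sep [a] = a := by
  apply String.toList_inj.mp
  simp [PySem.Str.toList_join, PySem.Chars.join_singleton]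

theorem pv_join_cons_foldr (sep : String) (x : String) (R : List String) :
    PySem.Str.join sep (x :: R) = x ++ R.foldr (fun e t => sep ++ e ++ t) "" := by
  induction R generalizing x with
  | nil => simp [pv_join_singleton]
  | cons r R ih =>
    rw [pv_join_cons_cons, ih]
    simp [String.append_assoc]

theorem pv_foldl_right (sep : String) (R : List String) (acc : String) :
    R.foldl (fun a e => a ++ sep ++ e) acc = acc ++ R.foldr (fun e t => sep ++ e ++ t) "" := by
  induction R generalizing acc with
  | nil => simp
  | cons r R ih =>
    simp only [List.foldl_cons, List.foldr_cons, ih]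
    simp [String.append_assoc]

theorem pv_foldl_left (sep : String) (L : List String) (acc : String) :
    L.foldl (fun a e => a ++ e ++ sep) acc = acc ++ L.foldr (fun e t => e ++ sep ++ t) "" := by
  induction L generalizing acc with
  | nil => simp
  | cons x L ih =>
    simp only [List.foldl_cons, List.foldr_cons, ih]
    simp [String.append_assoc]

theorem pv_join_split (sep new : String) (L R : List String) :
    PySem.Str.join sep (L ++ new :: R)
      = L.foldr (fun e t => e ++ sep ++ t) "" ++ new ++ R.foldr (fun e t => sep ++ e ++ t) "" := by
  induction L with
  | nil => simp [pv_join_cons_foldr, String.append_assoc]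
  | cons x L ih =>
    have hne : L ++ new :: R ≠ [] := by simp
    obtain ⟨y, l, hyl⟩ : ∃ y l, L ++ new :: R = y :: l := by
      cases h : L ++ new :: R with
      | nil => exact absurd h hne
      | cons y l => exact ⟨y, l, rfl⟩
    rw [List.cons_append, hyl, pv_join_cons_cons, ← hyl, ih]
    simp [String.append_assoc]

-- The two concatenation loops over the slices equal join of the inserted list.
theorem pv_key (sep new : String) (es : List String) (i : Int) :
    (PySem.List.slice es (some i) none).foldl (fun a e => a ++ sep ++ e)
      (((PySem.List.slice es none (some i)).foldl (fun a e => a ++ e ++ sep) "") ++ new)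
    = PySem.Str.join sep (PySem.List.insert es i new) := by
  rw [pv_insert_eq_take_drop, pv_join_split, PySem.List.slice_some_none, pv_slice_none_some,
      pv_foldl_right, pv_foldl_left]
  simp [String.append_assoc]

-- ===== VERDICT (by name: the statement is the Claim_ definition above) =====
theorem insert_element_in_line_py_spec : Claim_equal_insert_element_in_line_py := by
  intro line new_element index separator _ _
  unfold Spec_insert_element_in_line_py insert_element_in_line_py insert_element_in_line_py_alt
  cases h : PySem.Str.split? line separator with
  | none => rfl
  | some elements =>
    simp only []
    exact pv_key separator new_element elements _
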